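-- pv_equiv track=rewrite | github.com/DidierLeBail/Temporal-networks-PhD-code | libs/observables/centered_motifs_save.py | Get_tri_nb_ECTN
-- ===== SOURCE A (Python) =====
-- def Get_tri_nb_ECTN(seq,depth):
-- 	tri = 0
-- 	for i in range(len(seq)//depth-1):
-- 		ok = False
-- 		for letter1,letter2 in zip(seq[:depth],seq[(i+1)*depth:(i+2)*depth]):
-- 			if letter1=='1' and letter2=='3':
-- 				ok = True
-- 		tri += int(ok)
-- 	return tri
-- ===== SOURCE B (Python) =====
-- def Get_tri_nb_ECTN(seq, depth):
--     nblocks = len(seq) // depth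
--     marked = set()
--     for p, c in enumerate(seq):
--         if c == '3':
--             i, j = divmod(p, depth)
--             if 1 <= i < nblocks and seq[j] == '1':
--                 marked.add(i)
--     return len(marked)
-- ===== Notes on version B (the rewrite author's own statement) =====
-- stated objective: alternative
-- what changed: B replaces A's nested per-block zip scan by one flat pass over character positions: each '3' at position p is mapped by divmod(p,depth) to a block index, which is collected in a set when the first block has '1' at p%depth; the answer is the set's size.
-- outside the precondition, e.g. on Get_tri_nb_ECTN('1313', 0): A raises ZeroDivisionError, B raises ZeroDivisionError
import Mathlib
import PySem

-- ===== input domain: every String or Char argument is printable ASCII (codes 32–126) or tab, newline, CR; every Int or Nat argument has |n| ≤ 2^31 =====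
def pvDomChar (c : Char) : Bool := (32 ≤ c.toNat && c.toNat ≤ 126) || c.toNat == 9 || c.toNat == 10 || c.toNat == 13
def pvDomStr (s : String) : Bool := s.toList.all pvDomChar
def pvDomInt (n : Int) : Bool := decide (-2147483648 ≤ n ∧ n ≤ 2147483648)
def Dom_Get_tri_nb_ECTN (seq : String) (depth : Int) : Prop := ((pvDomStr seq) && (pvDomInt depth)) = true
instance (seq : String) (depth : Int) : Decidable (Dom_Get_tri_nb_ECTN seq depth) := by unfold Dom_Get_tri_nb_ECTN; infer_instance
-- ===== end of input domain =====

-- B replaces A's nested per-block zip scan by one flat pass over character positions that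
-- maps each '3' to its block index by divmod and collects qualifying indices in a set;
-- the answer is the set's size (alternative decomposition, not claimed faster).

-- ===== PORT A =====
def Get_tri_nb_ECTN (seq : String) (depth : Int) : Int :=
  let s := seq.toList
  (PySem.List.pyRange 0 (PySem.Int.floordiv (s.length : Int) depth - 1) 1).foldl
    (fun tri i =>
      let ok := ((PySem.List.slice s none (some depth)).zip
          (PySem.List.slice s (some ((i + 1) * depth)) (some ((i + 2) * depth)))).foldl
        (fun ok p => if p.1 = '1' ∧ p.2 = '3' then true else ok) false
      tri + (if ok then 1 else 0)) 0

-- ===== PORT B =====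
def Get_tri_nb_ECTN_alt (seq : String) (depth : Int) : Int :=
  let s := seq.toList
  let nblocks := PySem.Int.floordiv (s.length : Int) depth
  let marked : PySem.Set Int := (PySem.List.enumerate s 0).foldl
    (fun m pc =>
      if pc.2 = '3' then
        if 1 ≤ PySem.Int.floordiv pc.1 depth ∧ PySem.Int.floordiv pc.1 depth < nblocks ∧
            PySem.List.pyGet? s (PySem.Int.mod pc.1 depth) = some '1'
        then PySem.Set.add m (PySem.Int.floordiv pc.1 depth) else m
      else m) PySem.Set.empty
  PySem.Set.len marked

-- ===== PRECONDITION & SPEC =====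
-- Python A raises ZeroDivisionError exactly when depth = 0 (len(seq)//depth); B raises there too.
def Pre_Get_tri_nb_ECTN (seq : String) (depth : Int) : Prop := depth ≠ 0
instance (seq : String) (depth : Int) : Decidable (Pre_Get_tri_nb_ECTN seq depth) := by unfold Pre_Get_tri_nb_ECTN; infer_instance
def pvWitness_Get_tri_nb_ECTN : String × Int := ("1313", 2)

def Spec_Get_tri_nb_ECTN (seq : String) (depth : Int) (out : Int) : Prop := out = Get_tri_nb_ECTN_alt seq depth
instance (seq : String) (depth : Int) (out : Int) : Decidable (Spec_Get_tri_nb_ECTN seq depth out) := by unfold Spec_Get_tri_nb_ECTN; infer_instance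

-- ===== CLAIM (what is proved, stated in full; the proofs are below) =====
def Claim_equal_Get_tri_nb_ECTN : Prop := ∀ (seq : String) (depth : Int), Dom_Get_tri_nb_ECTN seq depth → Pre_Get_tri_nb_ECTN seq depth → Spec_Get_tri_nb_ECTN seq depth (Get_tri_nb_ECTN seq depth)

-- ===== LEMMAS AND PROOFS =====

-- A side: the 0/1-accumulating fold is a filter length
theorem pv_foldl_add_ite (P : Int → Bool) (l : List Int) (c : Int) :
    l.foldl (fun t i => t + if P i then 1 else 0) c = c + ((l.filter P).length : Int) := by
  induction l generalizing c with
  | nil => simp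
  | cons x xs ih => by_cases h : P x <;> simp [h, ih] <;> ring

-- A's inner zip-fold is an 'any' over the zipped pairs
theorem pv_foldl_or (l : List (Char × Char)) (init : Bool) :
    l.foldl (fun ok p => if p.1 = '1' ∧ p.2 = '3' then true else ok) init
      = (init || l.any (fun p => decide (p.1 = '1' ∧ p.2 = '3'))) := by
  induction l generalizing init with
  | nil => simp
  | cons x xs ih =>
    simp only [List.foldl_cons, List.any_cons, ih]
    by_cases h : x.1 = '1' ∧ x.2 = '3' <;> simp [h]

-- A's per-block check, characterised by positions (full block: (i+2)*d ≤ |s|)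
theorem pv_ok_iff (s : List Char) (d i : Int) (hd : 0 < d) (hi : 0 ≤ i)
    (hn : (i + 2) * d ≤ (s.length : Int)) :
    (((PySem.List.slice s none (some d)).zip
        (PySem.List.slice s (some ((i + 1) * d)) (some ((i + 2) * d)))).foldl
      (fun ok p => if p.1 = '1' ∧ p.2 = '3' then true else ok) false) = true
    ↔ ∃ (k : Nat), (k : Int) < d ∧ ∃ (h1 : k < s.length) (h2 : ((i + 1) * d).toNat + k < s.length),
        s[k] = '1' ∧ s[((i + 1) * d).toNat + k] = '3' := by
  have h1p : (0:Int) ≤ (i + 1) * d := by positivity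
  have h2p : (0:Int) ≤ (i + 2) * d := by positivity
  have hna : ((((i + 1) * d).toNat : Int)) = (i + 1) * d := Int.toNat_of_nonneg h1p
  have hnb : ((((i + 2) * d).toNat : Int)) = (i + 2) * d := Int.toNat_of_nonneg h2p
  have hDi : ((d.toNat : Int)) = d := Int.toNat_of_nonneg hd.le
  have hring : (i + 2) * d - (i + 1) * d = d := by ring
  have hE : ((i + 2) * d).toNat - ((i + 1) * d).toNat = d.toNat := by omega
  have hlen : ((i + 2) * d).toNat ≤ s.length := by omega
  have hsum : ((i + 1) * d).toNat + d.toNat ≤ s.length := by omega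
  rw [pv_foldl_or]
  simp only [Bool.false_or, List.any_eq_true]
  rw [PySem.List.slice_to s hd.le, PySem.List.slice_toNat s h1p h2p, hE]
  constructor
  · rintro ⟨p, hp, hpd⟩
    rcases List.mem_iff_getElem.1 hp with ⟨k, hk, hget⟩
    have hkz := hk
    simp only [List.length_zip, List.length_take, List.length_drop] at hkz
    have hk1 : k < d.toNat := by omega
    have hk2 : k < s.length := by omega
    have hk3 : ((i + 1) * d).toNat + k < s.length := by omega
    rw [List.getElem_zip] at hget
    have hdd := of_decide_eq_true hpd
    rw [← hget] at hdd
    simp only [List.getElem_take, List.getElem_drop] at hdd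
    exact ⟨k, by omega, hk2, hk3, hdd.1, hdd.2⟩
  · rintro ⟨k, hkd, hk1, hk2, hv1, hv3⟩
    have hkD : k < d.toNat := by omega
    refine ⟨(s[k], s[((i + 1) * d).toNat + k]), ?_, by simp [hv1, hv3]⟩
    apply List.mem_iff_getElem.2
    refine ⟨k, ?_, ?_⟩
    · simp only [List.length_zip, List.length_take, List.length_drop]
      omega
    · rw [List.getElem_zip]
      simp only [List.getElem_take, List.getElem_drop]

-- B side: membership in the accumulating set fold
theorem pv_mem_fold (s : List Char) (d nb : Int) (l : List (Int × Char)) (m : PySem.Set Int) (x : Int) :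
    x ∈ l.foldl (fun m pc =>
      if pc.2 = '3' then
        if 1 ≤ PySem.Int.floordiv pc.1 d ∧ PySem.Int.floordiv pc.1 d < nb ∧
            PySem.List.pyGet? s (PySem.Int.mod pc.1 d) = some '1'
        then PySem.Set.add m (PySem.Int.floordiv pc.1 d) else m
      else m) m
    ↔ x ∈ m ∨ ∃ pc ∈ l, pc.2 = '3' ∧ 1 ≤ PySem.Int.floordiv pc.1 d ∧
        PySem.Int.floordiv pc.1 d < nb ∧
        PySem.List.pyGet? s (PySem.Int.mod pc.1 d) = some '1' ∧ x = PySem.Int.floordiv pc.1 d := by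
  induction l generalizing m with
  | nil => simp
  | cons pc l ih =>
    simp only [List.foldl_cons, List.mem_cons]
    by_cases h3 : pc.2 = '3'
    · by_cases hg : 1 ≤ PySem.Int.floordiv pc.1 d ∧ PySem.Int.floordiv pc.1 d < nb ∧
          PySem.List.pyGet? s (PySem.Int.mod pc.1 d) = some '1'
      · rw [if_pos h3, if_pos hg, ih, PySem.Set.mem_add]
        constructor
        · rintro (((hx | hx) | ⟨q, hq, hc⟩))
          · exact Or.inl hx
          · exact Or.inr ⟨pc, Or.inl rfl, h3, hg.1, hg.2.1, hg.2.2, hx⟩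
          · exact Or.inr ⟨q, Or.inr hq, hc⟩
        · rintro (hx | ⟨q, (rfl | hq), hc⟩)
          · exact Or.inl (Or.inl hx)
          · exact Or.inl (Or.inr hc.2.2.2.2)
          · exact Or.inr ⟨q, hq, hc⟩
      · rw [if_pos h3, if_neg hg, ih]
        constructor
        · rintro (hx | ⟨q, hq, hc⟩)
          · exact Or.inl hx
          · exact Or.inr ⟨q, Or.inr hq, hc⟩
        · rintro (hx | ⟨q, (rfl | hq), hc⟩)
          · exact Or.inl hx
          · exact absurd ⟨hc.2.1, hc.2.2.1, hc.2.2.2.1⟩ hg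
          · exact Or.inr ⟨q, hq, hc⟩
    · rw [if_neg h3, ih]
      constructor
      · rintro (hx | ⟨q, hq, hc⟩)
        · exact Or.inl hx
        · exact Or.inr ⟨q, Or.inr hq, hc⟩
      · rintro (hx | ⟨q, (rfl | hq), hc⟩)
        · exact Or.inl hx
        · exact absurd hc.1 h3
        · exact Or.inr ⟨q, hq, hc⟩

-- B side: the fold keeps the set duplicate-free
theorem pv_nodup_fold (s : List Char) (d nb : Int) (l : List (Int × Char)) (m : PySem.Set Int)
    (hm : m.Nodup) :
    (l.foldl (fun m pc =>
      if pc.2 = '3' then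
        if 1 ≤ PySem.Int.floordiv pc.1 d ∧ PySem.Int.floordiv pc.1 d < nb ∧
            PySem.List.pyGet? s (PySem.Int.mod pc.1 d) = some '1'
        then PySem.Set.add m (PySem.Int.floordiv pc.1 d) else m
      else m) m).Nodup := by
  induction l generalizing m with
  | nil => exact hm
  | cons pc l ih =>
    simp only [List.foldl_cons]
    apply ih
    split
    · split
      · exact PySem.Set.nodup_add _ _ hm
      · exact hm
    · exact hm

-- nb ≥ 2 forces d > 0 (for d ≠ 0)
theorem pv_pos_of_two_le (n d : Int) (hn : 0 ≤ n) (hd : d ≠ 0)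
    (h2 : 2 ≤ PySem.Int.floordiv n d) : 0 < d := by
  rcases lt_or_gt_of_ne hd with hneg | hpos
  · exfalso
    have hb := PySem.Int.mod_neg_bounds n hneg
    have he := PySem.Int.floordiv_mul_add_mod n d
    nlinarith
  · exact hpos

-- the membership bijection between A's shifted block indices and B's marked set
theorem pv_mem_iff (s : List Char) (d : Int) (hd : d ≠ 0) (x : Int) :
    (∃ i ∈ (PySem.List.pyRange 0 (PySem.Int.floordiv (s.length : Int) d - 1) 1).filter
        (fun i => ((PySem.List.slice s none (some d)).zip
            (PySem.List.slice s (some ((i + 1) * d)) (some ((i + 2) * d)))).foldl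
          (fun ok p => if p.1 = '1' ∧ p.2 = '3' then true else ok) false),
        x = i + 1)
    ↔ ∃ pc ∈ PySem.List.enumerate s 0, pc.2 = '3' ∧ 1 ≤ PySem.Int.floordiv pc.1 d ∧
        PySem.Int.floordiv pc.1 d < PySem.Int.floordiv (s.length : Int) d ∧
        PySem.List.pyGet? s (PySem.Int.mod pc.1 d) = some '1' ∧ x = PySem.Int.floordiv pc.1 d := by
  by_cases h2 : 2 ≤ PySem.Int.floordiv (s.length : Int) d
  · have hdp : 0 < d := pv_pos_of_two_le _ _ (by positivity) hd h2
    have hnbd : PySem.Int.floordiv (s.length : Int) d * d ≤ (s.length : Int) :=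
      (PySem.Int.le_floordiv_iff_mul_le hdp).1 le_rfl
    constructor
    · rintro ⟨i, hi, rfl⟩
      rw [List.mem_filter, PySem.List.mem_pyRange_one] at hi
      obtain ⟨⟨hi0, hi1⟩, hok⟩ := hi
      have hfull : (i + 2) * d ≤ (s.length : Int) := by
        calc (i + 2) * d ≤ PySem.Int.floordiv (s.length : Int) d * d :=
              mul_le_mul_of_nonneg_right (by omega) hdp.le
          _ ≤ _ := hnbd
      obtain ⟨k, hkd, hk1, hk2, hv1, hv3⟩ := (pv_ok_iff s d i hdp hi0 hfull).1 hok
      have hna : ((((i + 1) * d).toNat : Int)) = (i + 1) * d :=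
        Int.toNat_of_nonneg (by positivity)
      have hr2 : (i + 1 + 1) * d = (i + 1) * d + d := by ring
      refine ⟨((0 : Int) + (((i + 1) * d).toNat + k : Nat), s[((i + 1) * d).toNat + k]),
        (PySem.List.mem_enumerate_iff s 0 _).2 ⟨_, hk2, rfl⟩, hv3, ?_⟩
      have hfd : PySem.Int.floordiv ((0 : Int) + (((i + 1) * d).toNat + k : Nat)) d = i + 1 := by
        rw [PySem.Int.floordiv_eq_iff_of_pos hdp]
        push_cast
        constructor <;> omega
      have hmd : PySem.Int.mod ((0 : Int) + (((i + 1) * d).toNat + k : Nat)) d = (k : Int) := by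
        have := PySem.Int.floordiv_mul_add_mod ((0 : Int) + (((i + 1) * d).toNat + k : Nat)) d
        rw [hfd] at this
        push_cast at this ⊢
        omega
      refine ⟨by rw [hfd]; omega, by rw [hfd]; omega, ?_, by rw [hfd]⟩
      rw [hmd, PySem.List.pyGet?_natCast, List.getElem?_eq_some_iff]
      exact ⟨hk1, hv1⟩
    · rintro ⟨pc, hpc, h3, hfd1, hfd2, hget, rfl⟩
      obtain ⟨p, hp, rfl⟩ := (PySem.List.mem_enumerate_iff s 0 pc).1 hpc
      simp only [zero_add] at h3 hfd1 hfd2 hget ⊢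
      set fd := PySem.Int.floordiv (p : Int) d with hfddef
      have hmod0 : 0 ≤ PySem.Int.mod (p : Int) d := PySem.Int.mod_nonneg _ hdp
      have hmodlt : PySem.Int.mod (p : Int) d < d := PySem.Int.mod_lt _ hdp
      have hsplit := PySem.Int.floordiv_mul_add_mod (p : Int) d
      set k := (PySem.Int.mod (p : Int) d).toNat with hkdef
      have hk : ((k : Int)) = PySem.Int.mod (p : Int) d := Int.toNat_of_nonneg hmod0
      have hget' : s[k]? = some '1' := by
        rw [← PySem.List.pyGet?_natCast, hk]; exact hget
      obtain ⟨hk1, hv1⟩ := List.getElem?_eq_some_iff.1 hget'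
      refine ⟨fd - 1, ?_, by omega⟩
      rw [List.mem_filter, PySem.List.mem_pyRange_one]
      refine ⟨⟨by omega, by omega⟩, ?_⟩
      have hi0 : (0:Int) ≤ fd - 1 := by omega
      have hfull : (fd - 1 + 2) * d ≤ (s.length : Int) := by
        calc (fd - 1 + 2) * d ≤ PySem.Int.floordiv (s.length : Int) d * d :=
              mul_le_mul_of_nonneg_right (by omega) hdp.le
          _ ≤ _ := hnbd
      apply (pv_ok_iff s d (fd - 1) hdp hi0 hfull).2
      have hna : ((((fd - 1 + 1) * d).toNat : Int)) = fd * d := by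
        rw [Int.toNat_of_nonneg (by nlinarith)]; ring
      have hpk : ((fd - 1 + 1) * d).toNat + k = p := by
        have hc : ((((fd - 1 + 1) * d).toNat : Int)) + (k : Int) = (p : Int) := by
          rw [hna, hk]; exact hsplit
        exact_mod_cast hc
      refine ⟨k, by omega, hk1, by omega, hv1, ?_⟩
      have : s[((fd - 1 + 1) * d).toNat + k]'(by omega) = s[p] := by
        congr 1
      rw [this, h3]
  · constructor
    · rintro ⟨i, hi, rfl⟩
      rw [List.mem_filter, PySem.List.mem_pyRange_one] at hi
      omega
    · rintro ⟨pc, hpc, h3, hfd1, hfd2, hget, rfl⟩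
      omega

-- ===== VERDICT (by name: the statement is the Claim_ definition above) =====
theorem Get_tri_nb_ECTN_spec : Claim_equal_Get_tri_nb_ECTN := by
  intro seq depth _ hpre
  unfold Spec_Get_tri_nb_ECTN Get_tri_nb_ECTN Get_tri_nb_ECTN_alt
  have hA := pv_foldl_add_ite
    (fun i => ((PySem.List.slice seq.toList none (some depth)).zip
        (PySem.List.slice seq.toList (some ((i + 1) * depth)) (some ((i + 2) * depth)))).foldl
      (fun ok p => if p.1 = '1' ∧ p.2 = '3' then true else ok) false)
    (PySem.List.pyRange 0 (PySem.Int.floordiv (seq.toList.length : Int) depth - 1) 1) 0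
  rw [zero_add] at hA
  rw [hA, PySem.Set.len]
  congr 1
  have hperm : (((PySem.List.enumerate seq.toList 0).foldl
      (fun m pc =>
        if pc.2 = '3' then
          if 1 ≤ PySem.Int.floordiv pc.1 depth ∧
              PySem.Int.floordiv pc.1 depth < PySem.Int.floordiv (seq.toList.length : Int) depth ∧
              PySem.List.pyGet? seq.toList (PySem.Int.mod pc.1 depth) = some '1'
          then PySem.Set.add m (PySem.Int.floordiv pc.1 depth) else m
        else m) PySem.Set.empty) : List Int).Perm
      (((PySem.List.pyRange 0 (PySem.Int.floordiv (seq.toList.length : Int) depth - 1) 1).filter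
        (fun i => ((PySem.List.slice seq.toList none (some depth)).zip
            (PySem.List.slice seq.toList (some ((i + 1) * depth)) (some ((i + 2) * depth)))).foldl
          (fun ok p => if p.1 = '1' ∧ p.2 = '3' then true else ok) false)).map (fun i => i + 1)) := by
    refine (List.perm_ext_iff_of_nodup
      (pv_nodup_fold seq.toList depth _ _ _ List.nodup_nil)
      (((PySem.List.nodup_pyRange_one 0 _).filter _).map (add_left_injective 1))).2 ?_
    intro a
    rw [pv_mem_fold, List.mem_map]
    simp only [List.not_mem_nil, false_or]
    rw [← pv_mem_iff seq.toList depth hpre a]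
    constructor
    · rintro ⟨i, hi, rfl⟩
      exact ⟨i, hi, rfl⟩
    · rintro ⟨i, hi, rfl⟩
      exact ⟨i, hi, rfl⟩
  rw [hperm.length_eq, List.length_map]
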